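-- pv_equiv track=rewrite | github.com/prediction-radar/api | csv_to_png.py | reflectivity_to_color
-- ===== SOURCE A (Python) =====
-- def reflectivity_to_color(reflectivity):
--     # Define the reflectivity thresholds and corresponding colors
--     reflectivity_colors = [
--         (5, "#0000FF"),   # Blue for light rain
--         (15, "#00FF00"),  # Green for moderate rain
--         (25, "#FFFF00"),  # Yellow for heavy rain
--         (35, "#FFA500"),  # Orange for very heavy rain
--         (45, "#FF0000"),  # Red for intense rain
--         (55, "#800080"),  # Purple for extreme rain
--         (65, "#FFFFFF"),  # White for hail
--     ]
--
--     for threshold, color in reflectivity_colors: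
--         if reflectivity < threshold:
--             return color, reflectivity < 15  # Return color and transparency flag
--     return "#FFFFFF", False  # Default to white for values beyond the defined range
-- ===== SOURCE B (Python) =====
-- def reflectivity_to_color(reflectivity):
--     thresholds = [5, 15, 25, 35, 45, 55, 65]
--     colors = ["#0000FF", "#00FF00", "#FFFF00", "#FFA500",
--               "#FF0000", "#800080", "#FFFFFF"]
--     # binary search for the first threshold strictly greater than reflectivity
--     lo, hi = 0, len(thresholds)
--     while lo < hi:
--         mid = (lo + hi) // 2
--         if reflectivity < thresholds[mid]:
--             hi = mid
--         else:
--             lo = mid + 1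
--     if lo == len(thresholds):
--         return "#FFFFFF", False
--     return colors[lo], reflectivity < 15
-- ===== Notes on version B (the rewrite author's own statement) =====
-- stated objective: alternative
-- what changed: Replaces the sequential scan over (threshold, color) pairs with a binary search over a thresholds list indexing a parallel colors list.
import Mathlib
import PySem

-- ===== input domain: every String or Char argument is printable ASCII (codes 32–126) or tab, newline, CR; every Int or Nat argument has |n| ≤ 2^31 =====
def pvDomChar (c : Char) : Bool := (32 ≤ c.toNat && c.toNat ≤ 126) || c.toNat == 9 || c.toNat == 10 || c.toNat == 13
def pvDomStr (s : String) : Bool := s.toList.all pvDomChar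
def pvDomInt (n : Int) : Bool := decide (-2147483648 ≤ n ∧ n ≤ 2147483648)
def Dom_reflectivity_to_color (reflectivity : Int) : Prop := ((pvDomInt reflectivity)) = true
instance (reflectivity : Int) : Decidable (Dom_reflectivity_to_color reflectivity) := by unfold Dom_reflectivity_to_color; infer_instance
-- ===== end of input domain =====

-- B replaces A's sequential scan over (threshold, color) pairs with a binary search
-- over a thresholds list indexing a parallel colors list (objective: alternative).


-- ===== PORT A =====
-- the for-loop over the pair list, first match wins; falls through to white
def rcLoop (reflectivity : Int) : List (Int × String) → String × Bool
  | [] => ("#FFFFFF", false)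
  | (threshold, color) :: rest =>
      if reflectivity < threshold then (color, decide (reflectivity < 15))
      else rcLoop reflectivity rest

def reflectivity_to_color (reflectivity : Int) : String × Bool :=
  let reflectivity_colors : List (Int × String) :=
    [(5, "#0000FF"), (15, "#00FF00"), (25, "#FFFF00"), (35, "#FFA500"),
     (45, "#FF0000"), (55, "#800080"), (65, "#FFFFFF")]
  rcLoop reflectivity reflectivity_colors

-- ===== PORT B =====
-- Source B's while-loop as fuel recursion (fuel = initial hi - lo = 7, enough for every round);
-- list indexing via getD: mid is always in range when lo < hi ≤ length
def rcThresholds : List Int := [5, 15, 25, 35, 45, 55, 65]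
def rcColors : List String :=
  ["#0000FF", "#00FF00", "#FFFF00", "#FFA500", "#FF0000", "#800080", "#FFFFFF"]

def rcBsearch (reflectivity : Int) : Nat → Nat → Nat → Nat
  | 0, lo, _ => lo
  | fuel + 1, lo, hi =>
      if lo < hi then
        let mid := (lo + hi) / 2
        if reflectivity < rcThresholds.getD mid 0 then rcBsearch reflectivity fuel lo mid
        else rcBsearch reflectivity fuel (mid + 1) hi
      else lo

def reflectivity_to_color_alt (reflectivity : Int) : String × Bool :=
  let lo := rcBsearch reflectivity 7 0 rcThresholds.length
  if lo = rcThresholds.length then ("#FFFFFF", false)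
  else (rcColors.getD lo "", decide (reflectivity < 15))

-- ===== PRECONDITION & SPEC =====
def Spec_reflectivity_to_color (reflectivity : Int) (out : String × Bool) : Prop := out = reflectivity_to_color_alt reflectivity
instance (reflectivity : Int) (out : String × Bool) : Decidable (Spec_reflectivity_to_color reflectivity out) := by unfold Spec_reflectivity_to_color; infer_instance

-- ===== CLAIM (what is proved, stated in full; the proofs are below) =====
def Claim_equal_reflectivity_to_color : Prop := ∀ (reflectivity : Int), Dom_reflectivity_to_color reflectivity → Spec_reflectivity_to_color reflectivity (reflectivity_to_color reflectivity)

-- ===== LEMMAS AND PROOFS =====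

-- ===== VERDICT (by name: the statement is the Claim_ definition above) =====
theorem reflectivity_to_color_spec : Claim_equal_reflectivity_to_color := by
  intro r _
  unfold Spec_reflectivity_to_color reflectivity_to_color reflectivity_to_color_alt
  rcases lt_or_ge r 5 with h | h
  · have c5 : r < 5 := by omega
    have c15 : r < 15 := by omega
    have c25 : r < 25 := by omega
    have c35 : r < 35 := by omega
    have c45 : r < 45 := by omega
    have c55 : r < 55 := by omega
    have c65 : r < 65 := by omega
    simp [rcLoop, rcBsearch, rcThresholds, rcColors, c5, c15, c35]
  rcases lt_or_ge r 15 with h | h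
  · have c5 : ¬ r < 5 := by omega
    have c15 : r < 15 := by omega
    have c25 : r < 25 := by omega
    have c35 : r < 35 := by omega
    have c45 : r < 45 := by omega
    have c55 : r < 55 := by omega
    have c65 : r < 65 := by omega
    simp [rcLoop, rcBsearch, rcThresholds, rcColors, c5, c15, c35]
  rcases lt_or_ge r 25 with h | h
  · have c5 : ¬ r < 5 := by omega
    have c15 : ¬ r < 15 := by omega
    have c25 : r < 25 := by omega
    have c35 : r < 35 := by omega
    have c45 : r < 45 := by omega
    have c55 : r < 55 := by omega
    have c65 : r < 65 := by omega
    simp [rcLoop, rcBsearch, rcThresholds, rcColors, c5, c15, c25, c35]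
  rcases lt_or_ge r 35 with h | h
  · have c5 : ¬ r < 5 := by omega
    have c15 : ¬ r < 15 := by omega
    have c25 : ¬ r < 25 := by omega
    have c35 : r < 35 := by omega
    have c45 : r < 45 := by omega
    have c55 : r < 55 := by omega
    have c65 : r < 65 := by omega
    simp [rcLoop, rcBsearch, rcThresholds, rcColors, c5, c15, c25, c35]
  rcases lt_or_ge r 45 with h | h
  · have c5 : ¬ r < 5 := by omega
    have c15 : ¬ r < 15 := by omega
    have c25 : ¬ r < 25 := by omega
    have c35 : ¬ r < 35 := by omega
    have c45 : r < 45 := by omega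
    have c55 : r < 55 := by omega
    have c65 : r < 65 := by omega
    simp [rcLoop, rcBsearch, rcThresholds, rcColors, c5, c15, c25, c35, c45, c55]
  rcases lt_or_ge r 55 with h | h
  · have c5 : ¬ r < 5 := by omega
    have c15 : ¬ r < 15 := by omega
    have c25 : ¬ r < 25 := by omega
    have c35 : ¬ r < 35 := by omega
    have c45 : ¬ r < 45 := by omega
    have c55 : r < 55 := by omega
    have c65 : r < 65 := by omega
    simp [rcLoop, rcBsearch, rcThresholds, rcColors, c5, c15, c25, c35, c45, c55]
  rcases lt_or_ge r 65 with h | h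
  · have c5 : ¬ r < 5 := by omega
    have c15 : ¬ r < 15 := by omega
    have c25 : ¬ r < 25 := by omega
    have c35 : ¬ r < 35 := by omega
    have c45 : ¬ r < 45 := by omega
    have c55 : ¬ r < 55 := by omega
    have c65 : r < 65 := by omega
    simp [rcLoop, rcBsearch, rcThresholds, rcColors, c5, c15, c25, c35, c45, c55, c65]
  · have c5 : ¬ r < 5 := by omega
    have c15 : ¬ r < 15 := by omega
    have c25 : ¬ r < 25 := by omega
    have c35 : ¬ r < 35 := by omega
    have c45 : ¬ r < 45 := by omega
    have c55 : ¬ r < 55 := by omega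
    have c65 : ¬ r < 65 := by omega
    simp [rcLoop, rcBsearch, rcThresholds, c5, c15, c25, c35, c45, c55, c65]
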